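-- pv_equiv track=rewrite | github.com/arthurdls/robust-vision-language-navigation | src/rvln/ai/utils/parsing.py | find_main_operator_index
-- ===== SOURCE A (Python) =====
-- def find_main_operator_index(formula):
--     """
--     Finds the main binary operator in the formula that is not enclosed in parentheses.
--     Operators are checked in order of increasing precedence: &, |, U.
--     """
--     paren_level = 0
--     # Store the rightmost index of each top-level operator found
--     split_indices = {'&': -1, '|': -1, 'U': -1}
--
--     for i, char in enumerate(formula):
--         if char == '(':
--             paren_level += 1
--         elif char == ')':
--             paren_level -= 1
--         elif paren_level == 0 and char in split_indices:
--             # This operator is at the top level (not inside any parentheses)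
--             split_indices[char] = i
--
--     # Return the operator with the lowest precedence found
--     if split_indices['&'] != -1:
--         return '&', split_indices['&']
--     if split_indices['|'] != -1:
--         return '|', split_indices['|']
--     if split_indices['U'] != -1:
--         return 'U', split_indices['U']
--
--     return None, -1
-- ===== SOURCE B (Python) =====
-- def find_main_operator_index(formula):
--     # Per-operator passes in precedence order; first operator with a
--     # top-level (paren_level==0) occurrence wins, rightmost index kept.
--     for op in ('&', '|', 'U'):
--         paren_level = 0
--         idx = -1
--         for i, ch in enumerate(formula):
--             if ch == '(':
--                 paren_level += 1
--             elif ch == ')':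
--                 paren_level -= 1
--             elif paren_level == 0 and ch == op:
--                 idx = i
--         if idx != -1:
--             return op, idx
--     return None, -1
-- ===== Notes on version B (the rewrite author's own statement) =====
-- stated objective: alternative
-- what changed: Replaces the single pass that fills a dict of rightmost indices for all three operators with early-returning per-operator scans in precedence order, each tracking paren depth and the rightmost top-level hit.
import Mathlib
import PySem

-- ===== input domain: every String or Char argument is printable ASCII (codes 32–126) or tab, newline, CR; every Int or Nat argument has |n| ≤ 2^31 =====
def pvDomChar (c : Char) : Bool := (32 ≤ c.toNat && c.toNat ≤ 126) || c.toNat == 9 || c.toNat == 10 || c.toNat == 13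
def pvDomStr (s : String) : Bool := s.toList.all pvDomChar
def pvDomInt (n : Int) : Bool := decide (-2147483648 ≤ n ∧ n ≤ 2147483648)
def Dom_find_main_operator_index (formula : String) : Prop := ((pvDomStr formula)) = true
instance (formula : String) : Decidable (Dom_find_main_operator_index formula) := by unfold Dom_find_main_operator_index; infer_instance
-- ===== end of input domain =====

-- B replaces A's single pass filling a dict of rightmost indices with early-returning
-- per-operator scans in precedence order (alternative decomposition, same cost).

-- ===== PORT A =====
-- the body of A's for-loop (named for the proofs; exactly the Python loop body)
def pvStepA (s : Int × PySem.Dict String Int) (p : Int × Char) : Int × PySem.Dict String Int :=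
  if p.2 = '(' then (s.1 + 1, s.2)
  else if p.2 = ')' then (s.1 - 1, s.2)
  else if s.1 = 0 ∧ s.2.contains (String.ofList [p.2]) then
    (s.1, s.2.insert (String.ofList [p.2]) p.1)
  else s

-- one pass: track paren level, record rightmost top-level index of each operator in a dict
def find_main_operator_index (formula : String) : Option String × Int :=
  let st := (PySem.List.enumerate formula.toList 0).foldl pvStepA
    (0, PySem.Dict.ofList [("&", -1), ("|", -1), ("U", -1)])
  let d := st.2
  if d.getD "&" (-1) ≠ -1 then (some "&", d.getD "&" (-1))
  else if d.getD "|" (-1) ≠ -1 then (some "|", d.getD "|" (-1))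
  else if d.getD "U" (-1) ≠ -1 then (some "U", d.getD "U" (-1))
  else (none, -1)

-- ===== PORT B =====
-- the body of B's inner loop for operator op
def pvStepB (op : Char) (s : Int × Int) (p : Int × Char) : Int × Int :=
  if p.2 = '(' then (s.1 + 1, s.2)
  else if p.2 = ')' then (s.1 - 1, s.2)
  else if s.1 = 0 ∧ p.2 = op then (s.1, p.1)
  else s

-- one scan for a single operator: rightmost index with paren level 0 (or -1)
def pvScanOp (formula : String) (op : Char) : Int :=
  ((PySem.List.enumerate formula.toList 0).foldl (pvStepB op) (0, -1)).2

-- try operators in precedence order, returning at the first hit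
def pvTryOps (formula : String) : List Char → Option String × Int
  | [] => (none, -1)
  | op :: rest =>
      let idx := pvScanOp formula op
      if idx ≠ -1 then (some (String.ofList [op]), idx) else pvTryOps formula rest

def find_main_operator_index_alt (formula : String) : Option String × Int :=
  pvTryOps formula ['&', '|', 'U']

-- ===== PRECONDITION & SPEC =====
def Spec_find_main_operator_index (formula : String) (out : Option String × Int) : Prop := out = find_main_operator_index_alt formula
instance (formula : String) (out : Option String × Int) : Decidable (Spec_find_main_operator_index formula out) := by unfold Spec_find_main_operator_index; infer_instance

-- ===== CLAIM (what is proved, stated in full; the proofs are below) =====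
def Claim_equal_find_main_operator_index : Prop := ∀ (formula : String), Dom_find_main_operator_index formula → Spec_find_main_operator_index formula (find_main_operator_index formula)

-- ===== LEMMAS AND PROOFS =====

def pvMkd (a b u : Int) : PySem.Dict String Int :=
  PySem.Dict.mk [("&", a), ("|", b), ("U", u)]

-- the main invariant: A's fold over a dict = the three per-operator folds of B
theorem pvInv (l : List (Int × Char)) : ∀ (lv a b u : Int),
    l.foldl pvStepA (lv, pvMkd a b u) =
      ((l.foldl (pvStepB '&') (lv, a)).1,
        pvMkd (l.foldl (pvStepB '&') (lv, a)).2
              (l.foldl (pvStepB '|') (lv, b)).2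
              (l.foldl (pvStepB 'U') (lv, u)).2) := by
  induction l with
  | nil => intro lv a b u; rfl
  | cons p l ih =>
    intro lv a b u
    simp only [List.foldl_cons]
    by_cases h1 : p.2 = '('
    · have : pvStepA (lv, pvMkd a b u) p = (lv + 1, pvMkd a b u) := by
        simp [pvStepA, h1]
      rw [this, ih]
      simp [pvStepB, h1]
    · by_cases h2 : p.2 = ')'
      · have : pvStepA (lv, pvMkd a b u) p = (lv - 1, pvMkd a b u) := by
          simp [pvStepA, h1, h2]
        rw [this, ih]
        simp [pvStepB, h1, h2]
      · by_cases h3 : lv = 0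
        · subst h3
          by_cases h4 : p.2 = '&'
          · have : pvStepA (0, pvMkd a b u) p = (0, pvMkd p.1 b u) := by
              simp [pvStepA, h1, h2, h4, pvMkd]; rfl
            rw [this, ih]
            have hb : p.2 ≠ '|' := by rw [h4]; decide
            have hu : p.2 ≠ 'U' := by rw [h4]; decide
            simp [pvStepB, h1, h2, h4, hb, hu]
          · by_cases h5 : p.2 = '|'
            · have : pvStepA (0, pvMkd a b u) p = (0, pvMkd a p.1 u) := by
                simp [pvStepA, h1, h2, h5, pvMkd]; rfl
              rw [this, ih]
              have hu : p.2 ≠ 'U' := by rw [h5]; decide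
              simp [pvStepB, h1, h2, h4, h5, hu]
            · by_cases h6 : p.2 = 'U'
              · have : pvStepA (0, pvMkd a b u) p = (0, pvMkd a b p.1) := by
                  simp [pvStepA, h1, h2, h6, pvMkd]; rfl
                rw [this, ih]
                simp [pvStepB, h1, h2, h4, h5, h6]
              · have hc : (pvMkd a b u).contains (String.ofList [p.2]) = false := by
                  have k4 : (("&" : String) == String.ofList [p.2]) = false := by
                    rw [beq_eq_false_iff_ne]; intro h
                    have := congrArg String.toList h; simp at this; exact h4 this.symm
                  have k5 : (("|" : String) == String.ofList [p.2]) = false := by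
                    rw [beq_eq_false_iff_ne]; intro h
                    have := congrArg String.toList h; simp at this; exact h5 this.symm
                  have k6 : (("U" : String) == String.ofList [p.2]) = false := by
                    rw [beq_eq_false_iff_ne]; intro h
                    have := congrArg String.toList h; simp at this; exact h6 this.symm
                  simp [pvMkd, PySem.Dict.contains_mk, k4, k5, k6]
                have : pvStepA (0, pvMkd a b u) p = (0, pvMkd a b u) := by
                  simp [pvStepA, h1, h2, hc]
                rw [this, ih]
                simp [pvStepB, h1, h2, h4, h5, h6]
        · have : pvStepA (lv, pvMkd a b u) p = (lv, pvMkd a b u) := by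
            simp [pvStepA, h1, h2, h3]
          rw [this, ih]
          simp [pvStepB, h1, h2, h3]

theorem pvGetD_mkd_amp (a b u : Int) : (pvMkd a b u).getD "&" (-1) = a := rfl
theorem pvGetD_mkd_bar (a b u : Int) : (pvMkd a b u).getD "|" (-1) = b := rfl
theorem pvGetD_mkd_U (a b u : Int) : (pvMkd a b u).getD "U" (-1) = u := rfl
theorem pvStr_amp : String.ofList ['&'] = "&" := rfl
theorem pvStr_bar : String.ofList ['|'] = "|" := rfl
theorem pvStr_U : String.ofList ['U'] = "U" := rfl

-- ===== VERDICT (by name: the statement is the Claim_ definition above) =====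
theorem find_main_operator_index_spec : Claim_equal_find_main_operator_index := by
  intro formula _
  unfold Spec_find_main_operator_index find_main_operator_index find_main_operator_index_alt
  have e : PySem.Dict.ofList [("&", (-1 : Int)), ("|", -1), ("U", -1)] = pvMkd (-1) (-1) (-1) := rfl
  rw [e, pvInv]
  simp only [pvTryOps, pvScanOp, pvGetD_mkd_amp, pvGetD_mkd_bar, pvGetD_mkd_U,
    pvStr_amp, pvStr_bar, pvStr_U]
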